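-- pv_equiv track=rewrite | github.com/pratham200329/SlideGen-A.I | ai_generator.py | _flow_types
-- ===== SOURCE A (Python) =====
-- from typing import Dict, List
--
-- def _flow_types(slide_count: int) -> List[str]:
--     base = [
--         "title",
--         "agenda",
--         "section",
--         "bullet",
--         "two-column",
--         "comparison",
--         "chart",
--         "timeline",
--         "conclusion",
--         "thank-you",
--     ]
--
--     if slide_count <= len(base):
--         return base[:slide_count]
--
--     flow = []
--     while len(flow) < slide_count:
--         flow.extend(base[2:-1])
--     flow = ["title"] + flow[: max(slide_count - 2, 0)] + ["thank-you"]
--     return flow[:slide_count]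
-- ===== SOURCE B (Python) =====
-- from typing import Dict, List
--
-- def _flow_types(slide_count: int) -> List[str]:
--     base = [
--         "title",
--         "agenda",
--         "section",
--         "bullet",
--         "two-column",
--         "comparison",
--         "chart",
--         "timeline",
--         "conclusion",
--         "thank-you",
--     ]
--     if slide_count <= len(base):
--         return base[:slide_count]
--     mid = base[2:-1]
--     return ["title"] + [mid[i % len(mid)] for i in range(slide_count - 2)] + ["thank-you"]
-- ===== Notes on version B (the rewrite author's own statement) =====
-- stated objective: simpler
-- what changed: The overshoot loop (repeatedly extend a list by the 7-element middle pattern, then slice it down twice) is replaced by direct positional construction: each middle slot is computed from its index modulo the cycle length, with no truncation passes.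
import Mathlib
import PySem

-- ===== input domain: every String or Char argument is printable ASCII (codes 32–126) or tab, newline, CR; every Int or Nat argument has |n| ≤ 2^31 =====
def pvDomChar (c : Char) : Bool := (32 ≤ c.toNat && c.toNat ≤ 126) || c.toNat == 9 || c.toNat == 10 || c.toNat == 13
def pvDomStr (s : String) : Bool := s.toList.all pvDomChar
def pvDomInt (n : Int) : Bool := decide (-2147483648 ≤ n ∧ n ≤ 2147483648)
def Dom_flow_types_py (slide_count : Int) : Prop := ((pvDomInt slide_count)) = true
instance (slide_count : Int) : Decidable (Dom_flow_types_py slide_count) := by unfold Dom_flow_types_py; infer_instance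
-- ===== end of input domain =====

-- B replaces A's overshoot-and-truncate loop by computing each middle slot from its index
-- modulo the 7-element cycle (objective: simpler; return value only, no mutation involved).

-- ===== PORT A =====
def pvBase : List String :=
  ["title", "agenda", "section", "bullet", "two-column", "comparison", "chart",
   "timeline", "conclusion", "thank-you"]

-- base[2:-1], the chunk A's while-loop extends `flow` by
def pvMid : List String := PySem.List.slice pvBase (some 2) (some (-1))

lemma pvMid_len : pvMid.length = 7 := by decide

-- `while len(flow) < slide_count: flow.extend(base[2:-1])`
def flowLoopA (n : Int) (flow : List String) : List String :=
  if h : (flow.length : Int) < n then flowLoopA n (flow ++ pvMid) else flow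
termination_by (n - flow.length).toNat
decreasing_by
  simp only [List.length_append, pvMid_len]
  omega

def flow_types_py (slide_count : Int) : List String :=
  if slide_count ≤ (pvBase.length : Int) then
    PySem.List.slice pvBase none (some slide_count)
  else
    let flow := flowLoopA slide_count []
    let flow2 := ["title"] ++ PySem.List.slice flow none (some (max (slide_count - 2) 0)) ++ ["thank-you"]
    PySem.List.slice flow2 none (some slide_count)

-- ===== PORT B =====
def flow_types_py_alt (slide_count : Int) : List String :=
  if slide_count ≤ (pvBase.length : Int) then
    PySem.List.slice pvBase none (some slide_count)
  else
    let mid := PySem.List.slice pvBase (some 2) (some (-1))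
    ["title"] ++
      (PySem.List.pyRange 0 (slide_count - 2) 1).map
        (fun i => PySem.List.pyGetD mid (PySem.Int.mod i (mid.length : Int)) "") ++
    ["thank-you"]

-- ===== PRECONDITION & SPEC =====
def Spec_flow_types_py (slide_count : Int) (out : List String) : Prop := out = flow_types_py_alt slide_count
instance (slide_count : Int) (out : List String) : Decidable (Spec_flow_types_py slide_count out) := by unfold Spec_flow_types_py; infer_instance

-- ===== CLAIM (what is proved, stated in full; the proofs are below) =====
def Claim_equal_flow_types_py : Prop := ∀ (slide_count : Int), Dom_flow_types_py slide_count → Spec_flow_types_py slide_count (flow_types_py slide_count)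

-- ===== LEMMAS AND PROOFS =====

-- the while-loop appends whole copies of pvMid until the length reaches n
lemma flowLoopA_spec (n : Int) (flow : List String) :
    ∃ k : Nat, flowLoopA n flow = flow ++ (List.replicate k pvMid).flatten ∧
      n ≤ ((flowLoopA n flow).length : Int) := by
  by_cases h : (flow.length : Int) < n
  · obtain ⟨k, hk, hlen⟩ := flowLoopA_spec n (flow ++ pvMid)
    refine ⟨k + 1, ?_, ?_⟩
    · rw [flowLoopA, dif_pos h, hk]
      simp [List.replicate_succ]
    · rw [flowLoopA, dif_pos h]; exact hlen
  · refine ⟨0, ?_, ?_⟩ <;> rw [flowLoopA, dif_neg h]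
    · simp
    · omega
termination_by (n - flow.length).toNat
decreasing_by
  simp only [List.length_append, pvMid_len]
  omega

-- taking a prefix of repeated copies of pvMid = indexing modulo 7
lemma take_flatten_replicate (k m : Nat) (hm : m ≤ 7 * k) :
    ((List.replicate k pvMid).flatten).take m
      = (List.range m).map (fun i => pvMid.getD (i % 7) "") := by
  induction k generalizing m with
  | zero =>
    interval_cases m
    rfl
  | succ k ih =>
    rw [List.replicate_succ, List.flatten_cons]
    by_cases h7 : m ≤ 7
    · rw [List.take_append_of_le_length (by rw [pvMid_len]; exact h7)]
      interval_cases m <;> rfl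
    · obtain ⟨m', rfl⟩ : ∃ m', m = 7 + m' := ⟨m - 7, by omega⟩
      rw [List.take_append, pvMid_len]
      simp only [show (7 : Nat) + m' - 7 = m' from by omega]
      rw [ih m' (by omega), List.take_of_length_le (by rw [pvMid_len]; omega),
        List.range_add]
      simp only [List.map_append, List.map_map]
      congr 1
      apply List.map_congr_left
      intro i _
      simp [Function.comp, Nat.add_mod_left]

theorem flow_types_py_spec : Claim_equal_flow_types_py := by
  intro n _
  unfold Spec_flow_types_py flow_types_py flow_types_py_alt
  by_cases h : n ≤ (pvBase.length : Int)
  · rw [if_pos h, if_pos h]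
  · rw [if_neg h, if_neg h]
    have hn : 10 < n := by simpa [pvBase] using h
    obtain ⟨k, hk, hlen⟩ := flowLoopA_spec n []
    rw [hk] at hlen ⊢
    simp only [List.nil_append] at hlen ⊢
    have hflatlen : ((List.replicate k pvMid).flatten).length = 7 * k := by
      simp [List.length_flatten, pvMid_len, Nat.mul_comm]
    have hmax : max (n - 2) 0 = n - 2 := by omega
    have h2 : (0:Int) ≤ n - 2 := by omega
    rw [hmax, PySem.List.slice_to _ h2]
    have hmle : (n - 2).toNat ≤ 7 * k := by
      rw [hflatlen] at hlen; omega
    rw [take_flatten_replicate k _ hmle]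
    -- final [:n] slice is the identity: the built list has length n
    rw [PySem.List.slice_to _ (by omega : (0:Int) ≤ n)]
    rw [List.take_of_length_le (by
      simp only [List.length_append, List.length_map, List.length_range, List.length_cons,
        List.length_nil]
      omega)]
    -- the two constructions are the same list
    congr 1
    congr 1
    rw [PySem.List.pyRange_one]
    simp only [List.map_map, sub_zero]
    apply List.map_congr_left
    intro i _
    simp only [Function.comp_apply, zero_add]
    have hmod : PySem.Int.mod (i : Int) ((PySem.List.slice pvBase (some 2) (some (-1))).length : Int)
        = ((i % 7 : Nat) : Int) := by
      rw [show (PySem.List.slice pvBase (some 2) (some (-1))).length = 7 from by decide]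
      exact_mod_cast PySem.Int.mod_natCast i 7
    rw [hmod, PySem.List.pyGetD_natCast]
    rfl
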